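-- pv_equiv track=rewrite | github.com/mmtIr/Clustering-Quranic-Surahs | Q_chCluster1_last.py | delSubSubs_close
-- ===== SOURCE A (Python) =====
-- from copy import copy as c_copy
--
-- def delSubSubs_close(spR,newSub,gSubGraphs,gSubGraphs_l,gSubGraphs_v,SubSubSp,gSubGraphs_wh):
--     outSubGraphs = c_copy(gSubGraphs)
--     outSubGraphs_l = c_copy(gSubGraphs_l)
--     outSubGraphs_v = c_copy(gSubGraphs_v)
--     outSubGraphs_wh = c_copy(gSubGraphs_wh)
--     out_add = 1
--     ssp1 = set(gSubGraphs.keys())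
--     ssp2 = spR & ssp1
--     for sssp in ssp2:
--         curSg_sp = gSubGraphs[sssp]
--         curSg_sp_l = gSubGraphs_l[sssp]
--         curSg_sp_v = gSubGraphs_v[sssp]
--         curSg_sp_wh = gSubGraphs_wh[sssp]
--         csl = len(curSg_sp)
--         cssp_i = 0
--         while cssp_i < csl:
--             if not curSg_sp:
--                 csl = 0
--                 continue
--             curGS = curSg_sp[cssp_i]
--             if len(curGS) < len(newSub):
--                 mn_sg = set(curGS)
--                 mx_sg = set(newSub)
--                 if not mn_sg.difference(mx_sg):
--                     "mn is subgraph of mx so delete mn"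
--                     curSg_sp.pop(cssp_i)
--                     curSg_sp_l.pop(cssp_i)
--                     curSg_sp_v.pop(cssp_i)
--                     curSg_sp_wh.pop(cssp_i)
--                 else:
--                     cssp_i += 1
--             else:
--                 mx_sg = set(curGS)
--                 mn_sg = set(newSub)
--                 if not mn_sg.difference(mx_sg):
--                     out_add = 0
--                 cssp_i += 1
--             csl = len(curSg_sp)
--         outSubGraphs[sssp] = c_copy(curSg_sp)
--         outSubGraphs_l[sssp] = c_copy(curSg_sp_l)
--         outSubGraphs_v[sssp] = c_copy(curSg_sp_v)
--         outSubGraphs_wh[sssp] = c_copy(curSg_sp_wh)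
--     return [outSubGraphs,outSubGraphs_l,outSubGraphs_v,outSubGraphs_wh],out_add
-- ===== SOURCE B (Python) =====
-- def delSubSubs_close(spR, newSub, gSubGraphs, gSubGraphs_l, gSubGraphs_v, SubSubSp, gSubGraphs_wh):
--     newSet = set(newSub)
--     nl = len(newSub)
--     out = dict(gSubGraphs)
--     out_l = dict(gSubGraphs_l)
--     out_v = dict(gSubGraphs_v)
--     out_wh = dict(gSubGraphs_wh)
--     out_add = 1
--     for k in spR & gSubGraphs.keys():
--         subs = gSubGraphs[k]
--         # pass 1: does any stored subgraph at least as long as newSub contain it?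
--         if any(len(g) >= nl and newSet <= set(g) for g in subs):
--             out_add = 0
--         # pass 2: keep-mask over the rows; survivors are those not strictly contained in newSub
--         keep = [len(g) >= nl or not set(g) <= newSet for g in subs]
--         out[k] = [g for g, kp in zip(subs, keep) if kp]
--         out_l[k] = [x for x, kp in zip(gSubGraphs_l[k], keep) if kp]
--         out_v[k] = [x for x, kp in zip(gSubGraphs_v[k], keep) if kp]
--         out_wh[k] = [x for x, kp in zip(gSubGraphs_wh[k], keep) if kp]
--     return [out, out_l, out_v, out_wh], out_add
-- ===== Notes on version B (the rewrite author's own statement) =====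
-- stated objective: simpler
-- what changed: A's interleaved index/pop while-loop per key is replaced by two separate passes: an any() membership test that decides out_add, and a keep-mask filter that rebuilds the four parallel lists via zip comprehensions; B does not mutate the input lists (return value is identical). Pre_ restricts to the natural domain of index-aligned inputs (each key of spR held by gSubGraphs present in the three parallel dicts with lists of equal length): on misaligned inputs the four lists no longer describe the same rows, A may raise IndexError/KeyError, and where both still return either value is defensible.
import Mathlib
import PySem

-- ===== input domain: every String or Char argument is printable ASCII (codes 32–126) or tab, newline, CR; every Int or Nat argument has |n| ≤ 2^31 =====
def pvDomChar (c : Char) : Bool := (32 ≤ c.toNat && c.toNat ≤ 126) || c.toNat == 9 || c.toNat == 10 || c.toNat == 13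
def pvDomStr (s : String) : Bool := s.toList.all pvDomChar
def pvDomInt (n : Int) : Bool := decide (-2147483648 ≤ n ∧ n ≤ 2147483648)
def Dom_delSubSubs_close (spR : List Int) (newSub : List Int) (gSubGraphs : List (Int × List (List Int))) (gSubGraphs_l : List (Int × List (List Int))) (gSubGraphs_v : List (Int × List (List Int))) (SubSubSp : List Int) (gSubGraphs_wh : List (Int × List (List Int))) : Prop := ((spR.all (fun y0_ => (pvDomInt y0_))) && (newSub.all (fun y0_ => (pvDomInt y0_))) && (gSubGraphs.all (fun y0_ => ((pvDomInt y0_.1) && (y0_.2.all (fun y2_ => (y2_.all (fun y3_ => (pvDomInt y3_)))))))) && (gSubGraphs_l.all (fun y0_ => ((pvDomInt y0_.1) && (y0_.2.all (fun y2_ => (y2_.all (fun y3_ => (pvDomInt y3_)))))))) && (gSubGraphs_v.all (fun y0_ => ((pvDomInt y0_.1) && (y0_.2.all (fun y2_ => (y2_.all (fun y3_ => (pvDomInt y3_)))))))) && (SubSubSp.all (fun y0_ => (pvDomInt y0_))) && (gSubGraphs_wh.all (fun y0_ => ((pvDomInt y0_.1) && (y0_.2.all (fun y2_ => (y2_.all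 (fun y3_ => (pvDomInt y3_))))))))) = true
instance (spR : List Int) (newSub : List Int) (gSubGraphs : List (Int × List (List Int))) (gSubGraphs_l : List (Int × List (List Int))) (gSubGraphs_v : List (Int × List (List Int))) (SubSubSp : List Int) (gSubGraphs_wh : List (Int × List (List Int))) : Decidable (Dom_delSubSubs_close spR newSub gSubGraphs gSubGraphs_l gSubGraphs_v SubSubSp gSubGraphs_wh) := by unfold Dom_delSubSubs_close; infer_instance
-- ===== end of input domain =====

-- B replaces A's interleaved index/pop while-loop by two separate passes per key (an `any` test for out_add
-- and a keep-mask zip filter of the four parallel lists); equivalence is about the RETURN value only —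
-- the Python A also mutates the stored lists in place via pop, B does not mutate its inputs.

-- ===== PORT A =====
-- A's inner while-loop over one key's four parallel lists: index cssp_i, in-place pops at cssp_i
-- (the four `.pop(cssp_i)` calls are ported as the bound check plus `eraseIdx`; on an out-of-range
-- parallel list Python raises IndexError — those inputs are excluded by Pre_ below, the port just exits).
-- `csl` always equals `sp.length` when the guard runs, so the guard is written with `sp.length` directly;
-- the (unreachable) `if not curSg_sp: csl = 0; continue` branch is kept as the `sp.isEmpty` exit.
def pvLoopA (newSub : List Int) (sp ls vs ws : List (List Int)) (i : Nat) (out_add : Int) :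
    List (List Int) × List (List Int) × List (List Int) × List (List Int) × Int :=
  if h : i < sp.length then
    if sp.isEmpty then (sp, ls, vs, ws, out_add)
    else
      let curGS := sp[i]
      if curGS.length < newSub.length then
        if (PySem.Set.diff (PySem.Set.ofList curGS) (PySem.Set.ofList newSub)).isEmpty then
          if hp : i < ls.length ∧ i < vs.length ∧ i < ws.length then
            pvLoopA newSub (sp.eraseIdx i) (ls.eraseIdx i) (vs.eraseIdx i) (ws.eraseIdx i) i out_add
          else (sp, ls, vs, ws, out_add)  -- Python: IndexError from a parallel .pop (outside Pre_)
        else pvLoopA newSub sp ls vs ws (i + 1) out_add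
      else
        pvLoopA newSub sp ls vs ws (i + 1)
          (if (PySem.Set.diff (PySem.Set.ofList newSub) (PySem.Set.ofList curGS)).isEmpty then 0
           else out_add)
  else (sp, ls, vs, ws, out_add)
termination_by sp.length - i
decreasing_by
  · simp [List.length_eraseIdx, h]; omega
  · omega
  · omega

def delSubSubs_close (spR : List Int) (newSub : List Int) (gSubGraphs : List (Int × List (List Int))) (gSubGraphs_l : List (Int × List (List Int))) (gSubGraphs_v : List (Int × List (List Int))) (SubSubSp : List Int) (gSubGraphs_wh : List (Int × List (List Int))) : (List (List (Int × List (List Int)))) × Int :=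
  let gsD := PySem.Dict.mk gSubGraphs
  let lD := PySem.Dict.mk gSubGraphs_l
  let vD := PySem.Dict.mk gSubGraphs_v
  let whD := PySem.Dict.mk gSubGraphs_wh
  let ssp1 := PySem.Set.ofList gsD.keys
  -- Python iterates the set spR & ssp1 in unspecified (hash) order; the loop body touches each key's
  -- entries independently and out_add only monotonically, so the result is order-independent and the
  -- port iterates in spR's order (spR is a set argument: distinct elements).
  let ssp2 := PySem.Set.inter (PySem.Set.ofList spR) ssp1
  let st :=
    ssp2.foldl
      (fun st k =>
        match gsD.get? k, lD.get? k, vD.get? k, whD.get? k with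
        | some sp, some ls, some vs, some ws =>
          let r := pvLoopA newSub sp ls vs ws 0 st.2.2.2.2
          (st.1.insert k r.1, st.2.1.insert k r.2.1, st.2.2.1.insert k r.2.2.1,
           st.2.2.2.1.insert k r.2.2.2.1, r.2.2.2.2)
        | _, _, _, _ => st)  -- Python: KeyError on a missing parallel key (outside Pre_)
      (gsD, lD, vD, whD, (1 : Int))
  ([st.1.items, st.2.1.items, st.2.2.1.items, st.2.2.2.1.items], st.2.2.2.2)

-- ===== PORT B =====
-- `[x for x, kp in zip(lst, keep) if kp]` (zip stops at the shorter list)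
def pvZipKeep {α : Type} : List Bool → List α → List α
  | b :: bs, x :: xs => if b then x :: pvZipKeep bs xs else pvZipKeep bs xs
  | _, _ => []

def delSubSubs_close_alt (spR : List Int) (newSub : List Int) (gSubGraphs : List (Int × List (List Int))) (gSubGraphs_l : List (Int × List (List Int))) (gSubGraphs_v : List (Int × List (List Int))) (SubSubSp : List Int) (gSubGraphs_wh : List (Int × List (List Int))) : (List (List (Int × List (List Int)))) × Int :=
  let newSet := PySem.Set.ofList newSub
  let nl := newSub.length
  let gsD := PySem.Dict.mk gSubGraphs
  let lD := PySem.Dict.mk gSubGraphs_l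
  let vD := PySem.Dict.mk gSubGraphs_v
  let whD := PySem.Dict.mk gSubGraphs_wh
  let st :=
    (PySem.Set.inter (PySem.Set.ofList spR) gsD.keys).foldl
      (fun st k =>
        -- the four dict lookups in sequence; a missing key is Python's KeyError (outside Pre_), ported as `st`
        (gsD.get? k).elim st fun subs =>
        (lD.get? k).elim st fun ls =>
        (vD.get? k).elim st fun vs =>
        (whD.get? k).elim st fun ws =>
          let out_add' :=
            if subs.any (fun g => decide (nl ≤ g.length) && PySem.Set.issubset newSet g) then 0
            else st.2.2.2.2
          let keep := subs.map (fun g => decide (nl ≤ g.length) || ! g.all (fun x => PySem.Set.contains newSet x))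
          (st.1.insert k (pvZipKeep keep subs), st.2.1.insert k (pvZipKeep keep ls),
           st.2.2.1.insert k (pvZipKeep keep vs), st.2.2.2.1.insert k (pvZipKeep keep ws), out_add'))
      (gsD, lD, vD, whD, (1 : Int))
  ([st.1.items, st.2.1.items, st.2.2.1.items, st.2.2.2.1.items], st.2.2.2.2)

-- ===== PRECONDITION & SPEC =====
-- Pre_ restricts to the natural domain of index-aligned inputs: each key of spR that gSubGraphs holds
-- must be present in the three parallel dicts with lists of the SAME length as its subgraph list.
-- On misaligned inputs the four lists no longer describe the same rows, A may raise (IndexError/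
-- KeyError from a parallel pop/lookup), and where both still return either value is defensible
-- (A keeps a longer list's tail, B filters only the aligned rows; see claim cites).
def pvPreKey (gSubGraphs gSubGraphs_l gSubGraphs_v gSubGraphs_wh : List (Int × List (List Int))) (k : Int) : Bool :=
  match (PySem.Dict.mk gSubGraphs).get? k with
  | none => true
  | some sp =>
    (match (PySem.Dict.mk gSubGraphs_l).get? k with | none => false | some ls => decide (ls.length = sp.length)) &&
    (match (PySem.Dict.mk gSubGraphs_v).get? k with | none => false | some vs => decide (vs.length = sp.length)) &&
    (match (PySem.Dict.mk gSubGraphs_wh).get? k with | none => false | some ws => decide (ws.length = sp.length))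

def Pre_delSubSubs_close (spR : List Int) (newSub : List Int) (gSubGraphs : List (Int × List (List Int))) (gSubGraphs_l : List (Int × List (List Int))) (gSubGraphs_v : List (Int × List (List Int))) (SubSubSp : List Int) (gSubGraphs_wh : List (Int × List (List Int))) : Prop :=
  ∀ k ∈ spR, pvPreKey gSubGraphs gSubGraphs_l gSubGraphs_v gSubGraphs_wh k = true
instance (spR : List Int) (newSub : List Int) (gSubGraphs : List (Int × List (List Int))) (gSubGraphs_l : List (Int × List (List Int))) (gSubGraphs_v : List (Int × List (List Int))) (SubSubSp : List Int) (gSubGraphs_wh : List (Int × List (List Int))) : Decidable (Pre_delSubSubs_close spR newSub gSubGraphs gSubGraphs_l gSubGraphs_v SubSubSp gSubGraphs_wh) := by unfold Pre_delSubSubs_close; infer_instance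

def pvWitness_delSubSubs_close : List Int × List Int × (List (Int × List (List Int))) × (List (Int × List (List Int))) × (List (Int × List (List Int))) × List Int × (List (Int × List (List Int))) :=
  ([1], [2], [(1, [[2], [3, 4]])], [(1, [[5], [6]])], [(1, [[7], [8]])], [], [(1, [[9], [10]])])

def Spec_delSubSubs_close (spR : List Int) (newSub : List Int) (gSubGraphs : List (Int × List (List Int))) (gSubGraphs_l : List (Int × List (List Int))) (gSubGraphs_v : List (Int × List (List Int))) (SubSubSp : List Int) (gSubGraphs_wh : List (Int × List (List Int))) (out : (List (List (Int × List (List Int)))) × Int) : Prop := out = delSubSubs_close_alt spR newSub gSubGraphs gSubGraphs_l gSubGraphs_v SubSubSp gSubGraphs_wh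
instance (spR : List Int) (newSub : List Int) (gSubGraphs : List (Int × List (List Int))) (gSubGraphs_l : List (Int × List (List Int))) (gSubGraphs_v : List (Int × List (List Int))) (SubSubSp : List Int) (gSubGraphs_wh : List (Int × List (List Int))) (out : (List (List (Int × List (List Int)))) × Int) : Decidable (Spec_delSubSubs_close spR newSub gSubGraphs gSubGraphs_l gSubGraphs_v SubSubSp gSubGraphs_wh out) := by unfold Spec_delSubSubs_close; infer_instance

-- ===== CLAIM (what is proved, stated in full; the proofs are below) =====
def Claim_equal_delSubSubs_close : Prop := ∀ (spR : List Int) (newSub : List Int) (gSubGraphs : List (Int × List (List Int))) (gSubGraphs_l : List (Int × List (List Int))) (gSubGraphs_v : List (Int × List (List Int))) (SubSubSp : List Int) (gSubGraphs_wh : List (Int × List (List Int))), Dom_delSubSubs_close spR newSub gSubGraphs gSubGraphs_l gSubGraphs_v SubSubSp gSubGraphs_wh → Pre_delSubSubs_close spR newSub gSubGraphs gSubGraphs_l gSubGraphs_v SubSubSp gSubGraphs_wh → Spec_delSubSubs_close spR newSub gSubGraphs gSubGraphs_l gSubGraphs_v SubSubSp gSubGraphs_wh (delSubSubs_close spR newSub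 gSubGraphs gSubGraphs_l gSubGraphs_v SubSubSp gSubGraphs_wh)

-- ===== LEMMAS AND PROOFS =====

def pvKeepP (ns g : List Int) : Bool :=
  decide (ns.length ≤ g.length) || ! g.all (fun x => PySem.Set.contains (PySem.Set.ofList ns) x)
def pvBigP (ns g : List Int) : Bool :=
  decide (ns.length ≤ g.length) && PySem.Set.issubset (PySem.Set.ofList ns) g
def pvKeepTail {α : Type} : List Bool → List α → List α
  | b :: bs, x :: xs => if b then x :: pvKeepTail bs xs else pvKeepTail bs xs
  | [], xs => xs
  | _ :: _, [] => []

theorem diffEmpty_eq_all (a b : List Int) : (PySem.Set.diff (PySem.Set.ofList a) (PySem.Set.ofList b)).isEmpty = a.all (fun x => PySem.Set.contains (PySem.Set.ofList b) x) := by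
  rw [Bool.eq_iff_iff]
  simp [List.isEmpty_iff, List.eq_nil_iff_forall_not_mem, PySem.Set.mem_diff, PySem.Set.mem_ofList, List.all_eq_true, PySem.Set.contains]

theorem diffEmpty_eq_issubset (a : List Int) (b : List Int) : (PySem.Set.diff (PySem.Set.ofList a) (PySem.Set.ofList b)).isEmpty = PySem.Set.issubset (PySem.Set.ofList a) b := by
  rw [Bool.eq_iff_iff, PySem.Set.issubset_iff]
  simp [List.isEmpty_iff, List.eq_nil_iff_forall_not_mem, PySem.Set.mem_diff, PySem.Set.mem_ofList]

theorem take_eraseIdx_self {α : Type} (xs : List α) (i : Nat) (h : i ≤ xs.length) : (xs.eraseIdx i).take i = xs.take i := by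
  rw [List.eraseIdx_eq_take_drop_succ, List.take_append_of_le_length (by simp; omega)]
  simp

theorem drop_eraseIdx_self {α : Type} (xs : List α) (i : Nat) (h : i ≤ xs.length) : (xs.eraseIdx i).drop i = xs.drop (i+1) := by
  rw [List.eraseIdx_eq_take_drop_succ, List.drop_append]
  simp [Nat.min_eq_left h]

theorem take_succ_getElem {α : Type} (xs : List α) (i : Nat) (h : i < xs.length) : xs.take (i+1) = xs.take i ++ [xs[i]] := by
  rw [List.take_add_one, List.getElem?_eq_getElem h]; rfl

theorem pvLoopA_spec (ns : List Int) (sp ls vs ws : List (List Int)) (i : Nat) (oa : Int)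
    (h1 : sp.length ≤ ls.length) (h2 : sp.length ≤ vs.length) (h3 : sp.length ≤ ws.length) :
    pvLoopA ns sp ls vs ws i oa =
      (sp.take i ++ pvKeepTail ((sp.drop i).map (pvKeepP ns)) (sp.drop i),
       ls.take i ++ pvKeepTail ((sp.drop i).map (pvKeepP ns)) (ls.drop i),
       vs.take i ++ pvKeepTail ((sp.drop i).map (pvKeepP ns)) (vs.drop i),
       ws.take i ++ pvKeepTail ((sp.drop i).map (pvKeepP ns)) (ws.drop i),
       if (sp.drop i).any (pvBigP ns) then 0 else oa) := by
  fun_induction pvLoopA ns sp ls vs ws i oa with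
  | case1 sp ls vs ws i oa h hemp =>
      exact absurd h (by simp_all [List.isEmpty_iff])
  | case2 sp ls vs ws i oa h hemp g hlt hdiff hlen ih =>
      have hg : g = sp[i] := rfl
      rw [hg] at hlt hdiff
      have hi1 : i < ls.length := hlen.1
      have hi2 : i < vs.length := hlen.2.1
      have hi3 : i < ws.length := hlen.2.2
      have e1 : (sp.eraseIdx i).length ≤ (ls.eraseIdx i).length := by
        rw [List.length_eraseIdx_of_lt h, List.length_eraseIdx_of_lt hi1]; omega
      have e2 : (sp.eraseIdx i).length ≤ (vs.eraseIdx i).length := by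
        rw [List.length_eraseIdx_of_lt h, List.length_eraseIdx_of_lt hi2]; omega
      have e3 : (sp.eraseIdx i).length ≤ (ws.eraseIdx i).length := by
        rw [List.length_eraseIdx_of_lt h, List.length_eraseIdx_of_lt hi3]; omega
      rw [ih e1 e2 e3]
      have hk : pvKeepP ns sp[i] = false := by
        rw [diffEmpty_eq_all] at hdiff
        unfold pvKeepP
        rw [decide_eq_false (by omega), hdiff, Bool.false_or]
        rfl
      have hb : pvBigP ns sp[i] = false := by
        unfold pvBigP
        rw [decide_eq_false (by omega), Bool.false_and]
      rw [take_eraseIdx_self sp i (by omega), take_eraseIdx_self ls i (by omega),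
          take_eraseIdx_self vs i (by omega), take_eraseIdx_self ws i (by omega),
          drop_eraseIdx_self sp i (by omega), drop_eraseIdx_self ls i (by omega),
          drop_eraseIdx_self vs i (by omega), drop_eraseIdx_self ws i (by omega),
          List.drop_eq_getElem_cons h, List.drop_eq_getElem_cons hi1,
          List.drop_eq_getElem_cons hi2, List.drop_eq_getElem_cons hi3]
      simp only [List.map_cons, hk, hb, pvKeepTail, List.any_cons, Bool.false_or]
      simp
  | case3 sp ls vs ws i oa h hemp g hlt hdiff hlen =>
      exact absurd ⟨by omega, by omega, by omega⟩ hlen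
  | case4 sp ls vs ws i oa h hemp g hlt hdiff ih =>
      have hg : g = sp[i] := rfl
      rw [hg] at hlt hdiff
      rw [ih h1 h2 h3]
      have hk : pvKeepP ns sp[i] = true := by
        unfold pvKeepP
        rw [diffEmpty_eq_all] at hdiff
        simp only [Bool.not_eq_true] at hdiff
        rw [hdiff]
        simp
      have hb : pvBigP ns sp[i] = false := by
        unfold pvBigP
        rw [decide_eq_false (by omega), Bool.false_and]
      rw [take_succ_getElem sp i h, take_succ_getElem ls i (by omega),
          take_succ_getElem vs i (by omega), take_succ_getElem ws i (by omega),
          List.drop_eq_getElem_cons h, List.drop_eq_getElem_cons (show i < ls.length by omega),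
          List.drop_eq_getElem_cons (show i < vs.length by omega),
          List.drop_eq_getElem_cons (show i < ws.length by omega)]
      simp only [List.map_cons, hk, hb, pvKeepTail, List.any_cons, Bool.false_or,
        List.append_assoc, List.cons_append, List.nil_append]
      simp
  | case5 sp ls vs ws i oa h hemp g hge ih =>
      have hg : g = sp[i] := rfl
      rw [hg] at hge
      simp only [hg, dite_eq_ite] at ih ⊢
      rw [ih h1 h2 h3]
      have hk : pvKeepP ns sp[i] = true := by
        unfold pvKeepP
        rw [decide_eq_true (by omega), Bool.true_or]
      have hb : pvBigP ns sp[i] = (PySem.Set.diff (PySem.Set.ofList ns) (PySem.Set.ofList sp[i])).isEmpty := by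
        unfold pvBigP
        rw [diffEmpty_eq_issubset, decide_eq_true (by omega), Bool.true_and]
      rw [take_succ_getElem sp i h, take_succ_getElem ls i (by omega),
          take_succ_getElem vs i (by omega), take_succ_getElem ws i (by omega),
          List.drop_eq_getElem_cons h, List.drop_eq_getElem_cons (show i < ls.length by omega),
          List.drop_eq_getElem_cons (show i < vs.length by omega),
          List.drop_eq_getElem_cons (show i < ws.length by omega)]
      simp only [List.map_cons, pvKeepTail, hk, if_true, List.any_cons, hb, List.append_assoc,
        List.cons_append, List.nil_append]
      by_cases hss : (PySem.Set.diff (PySem.Set.ofList ns) (PySem.Set.ofList sp[i])).isEmpty = true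
      · simp [hss]
      · simp at hss
        simp [hss]
  | case6 sp ls vs ws i oa h =>
      have hle : sp.length ≤ i := Nat.le_of_not_lt h
      have hsp : sp.drop i = [] := List.drop_of_length_le hle
      rw [hsp]
      simp [pvKeepTail, hle]


theorem zipKeep_keepTail_of_length_eq {α : Type} (bs : List Bool) (xs : List α) (h : xs.length = bs.length) :
    pvZipKeep bs xs = pvKeepTail bs xs := by
  induction bs generalizing xs with
  | nil => cases xs <;> simp_all [pvZipKeep, pvKeepTail]
  | cons b bs ih =>
      cases xs with
      | nil => simp at h
      | cons x xs =>
          simp at h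
          cases b <;> simp [pvZipKeep, pvKeepTail, ih xs h]

theorem body_eq (ns : List Int) (gs l v wh : List (Int × List (List Int))) (k : Int)
    (hpk : pvPreKey gs l v wh k = true)
    (st : PySem.Dict Int (List (List Int)) × PySem.Dict Int (List (List Int)) × PySem.Dict Int (List (List Int)) × PySem.Dict Int (List (List Int)) × Int) :
    (match (PySem.Dict.mk gs).get? k, (PySem.Dict.mk l).get? k, (PySem.Dict.mk v).get? k, (PySem.Dict.mk wh).get? k with
     | some sp, some ls, some vs, some ws =>
       let r := pvLoopA ns sp ls vs ws 0 st.2.2.2.2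
       (st.1.insert k r.1, st.2.1.insert k r.2.1, st.2.2.1.insert k r.2.2.1,
        st.2.2.2.1.insert k r.2.2.2.1, r.2.2.2.2)
     | _, _, _, _ => st) =
    (((PySem.Dict.mk gs).get? k).elim st fun subs =>
     ((PySem.Dict.mk l).get? k).elim st fun ls =>
     ((PySem.Dict.mk v).get? k).elim st fun vs =>
     ((PySem.Dict.mk wh).get? k).elim st fun ws =>
       let out_add' :=
         if subs.any (fun g => decide (ns.length ≤ g.length) && PySem.Set.issubset (PySem.Set.ofList ns) g) then 0
         else st.2.2.2.2
       let keep := subs.map (fun g => decide (ns.length ≤ g.length) || ! g.all (fun x => PySem.Set.contains (PySem.Set.ofList ns) x))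
       (st.1.insert k (pvZipKeep keep subs), st.2.1.insert k (pvZipKeep keep ls),
        st.2.2.1.insert k (pvZipKeep keep vs), st.2.2.2.1.insert k (pvZipKeep keep ws), out_add')) := by
  cases hgs : (PySem.Dict.mk gs).get? k with
  | none => rfl
  | some sp =>
    cases hls : (PySem.Dict.mk l).get? k with
    | none => rfl
    | some ls =>
      cases hvs : (PySem.Dict.mk v).get? k with
      | none => rfl
      | some vs =>
        cases hws : (PySem.Dict.mk wh).get? k with
        | none => rfl
        | some ws =>
          simp only [pvPreKey, hgs, hls, hvs, hws, Bool.and_eq_true, decide_eq_true_eq] at hpk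
          obtain ⟨⟨hl1, hl2⟩, hl3⟩ := hpk
          simp only []
          rw [pvLoopA_spec ns sp ls vs ws 0 st.2.2.2.2 (by omega) (by omega) (by omega)]
          rw [show (fun g => decide (ns.length ≤ g.length) || ! g.all (fun x => PySem.Set.contains (PySem.Set.ofList ns) x)) = pvKeepP ns from rfl,
              show (fun g => decide (ns.length ≤ g.length) && PySem.Set.issubset (PySem.Set.ofList ns) g) = pvBigP ns from rfl]
          have hz : ∀ xs : List (List Int), xs.length = sp.length →
              pvZipKeep (sp.map (pvKeepP ns)) xs = pvKeepTail (sp.map (pvKeepP ns)) xs := by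
            intro xs hx
            exact zipKeep_keepTail_of_length_eq _ _ (by simpa using hx)
          simp only [hz sp rfl, hz ls hl1, hz vs hl2, hz ws hl3, List.drop_zero, List.take_zero,
            List.nil_append, Option.elim_some]
          rfl

theorem inter_ofList_right (s t : List Int) :
    PySem.Set.inter s (PySem.Set.ofList t) = PySem.Set.inter s t := by
  simp [PySem.Set.inter]

-- ===== VERDICT (by name: the statement is the Claim_ definition above) =====
theorem delSubSubs_close_spec : Claim_equal_delSubSubs_close := by
  intro spR newSub gSubGraphs gSubGraphs_l gSubGraphs_v SubSubSp gSubGraphs_wh hDom hPre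
  unfold Spec_delSubSubs_close
  have hfold :
      (PySem.Set.inter (PySem.Set.ofList spR) (PySem.Set.ofList (PySem.Dict.mk gSubGraphs).keys)).foldl
        (fun st k =>
          match (PySem.Dict.mk gSubGraphs).get? k, (PySem.Dict.mk gSubGraphs_l).get? k,
                (PySem.Dict.mk gSubGraphs_v).get? k, (PySem.Dict.mk gSubGraphs_wh).get? k with
          | some sp, some ls, some vs, some ws =>
            let r := pvLoopA newSub sp ls vs ws 0 st.2.2.2.2
            (st.1.insert k r.1, st.2.1.insert k r.2.1, st.2.2.1.insert k r.2.2.1,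
             st.2.2.2.1.insert k r.2.2.2.1, r.2.2.2.2)
          | _, _, _, _ => st)
        (PySem.Dict.mk gSubGraphs, PySem.Dict.mk gSubGraphs_l, PySem.Dict.mk gSubGraphs_v, PySem.Dict.mk gSubGraphs_wh, (1 : Int)) =
      (PySem.Set.inter (PySem.Set.ofList spR) ((PySem.Dict.mk gSubGraphs).keys)).foldl
        (fun st k =>
          ((PySem.Dict.mk gSubGraphs).get? k).elim st fun subs =>
          ((PySem.Dict.mk gSubGraphs_l).get? k).elim st fun ls =>
          ((PySem.Dict.mk gSubGraphs_v).get? k).elim st fun vs =>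
          ((PySem.Dict.mk gSubGraphs_wh).get? k).elim st fun ws =>
            let out_add' :=
              if subs.any (fun g => decide (newSub.length ≤ g.length) && PySem.Set.issubset (PySem.Set.ofList newSub) g) then 0
              else st.2.2.2.2
            let keep := subs.map (fun g => decide (newSub.length ≤ g.length) || ! g.all (fun x => PySem.Set.contains (PySem.Set.ofList newSub) x))
            (st.1.insert k (pvZipKeep keep subs), st.2.1.insert k (pvZipKeep keep ls),
             st.2.2.1.insert k (pvZipKeep keep vs), st.2.2.2.1.insert k (pvZipKeep keep ws), out_add'))
        (PySem.Dict.mk gSubGraphs, PySem.Dict.mk gSubGraphs_l, PySem.Dict.mk gSubGraphs_v, PySem.Dict.mk gSubGraphs_wh, (1 : Int)) := by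
    rw [inter_ofList_right]
    apply PySem.List.foldl_congr_mem
    intro acc x hx
    have hxsp : x ∈ spR := by
      have := (PySem.Set.mem_inter _ _ _).mp hx
      exact (PySem.Set.mem_ofList _ _).mp this.1
    exact body_eq newSub gSubGraphs gSubGraphs_l gSubGraphs_v gSubGraphs_wh x (hPre x hxsp) acc
  exact congrArg
    (fun st : PySem.Dict Int (List (List Int)) × PySem.Dict Int (List (List Int)) × PySem.Dict Int (List (List Int)) × PySem.Dict Int (List (List Int)) × Int =>
      (([st.1.items, st.2.1.items, st.2.2.1.items, st.2.2.2.1.items], st.2.2.2.2) : (List (List (Int × List (List Int)))) × Int))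
    hfold
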